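-- pv_equiv track=rewrite | github.com/maulanaisa/Machine-Learning-App-Engineer-Test | Q3/main.py | integerMapping
-- ===== SOURCE A (Python) =====
-- def integerMapping(label) :
--   temp = {}
--   output = []
--   i=0
--   for x in label :
--     if x not in temp :
--       temp[x] = i
--       i+=1
--     output.append(temp[x])
--   return output
-- ===== SOURCE B (Python) =====
-- def integerMapping(label):
--     # ID of a label = number of distinct labels occurring strictly before its
--     # first occurrence: no accumulating dict/counter, each output element is
--     # computed independently from the input list alone.
--     return [len(set(label[:label.index(x)])) for x in label]
-- ===== Notes on version B (the rewrite author's own statement) =====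
-- stated objective: alternative
-- what changed: Replaces A's single stateful loop (dict of seen labels plus running counter mutated while emitting) by a stateless per-element computation: each label's ID is recomputed independently as the number of distinct labels strictly before its first occurrence (len(set(label[:label.index(x)]))) — no dictionary or counter at all, at the price of quadratic cost.
import Mathlib
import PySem

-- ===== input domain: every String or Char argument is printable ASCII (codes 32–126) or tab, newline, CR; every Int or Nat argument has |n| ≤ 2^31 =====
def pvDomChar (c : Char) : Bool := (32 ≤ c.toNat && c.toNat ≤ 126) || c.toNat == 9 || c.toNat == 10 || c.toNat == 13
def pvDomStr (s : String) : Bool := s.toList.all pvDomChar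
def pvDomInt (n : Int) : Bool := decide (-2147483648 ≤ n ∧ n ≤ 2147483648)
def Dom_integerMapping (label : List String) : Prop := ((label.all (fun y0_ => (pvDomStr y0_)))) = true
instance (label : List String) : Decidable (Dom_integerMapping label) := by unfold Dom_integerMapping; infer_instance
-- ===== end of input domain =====

-- B replaces A's single stateful loop (seen-dict + running counter) by a stateless
-- per-element computation: each ID is len(set(label[:label.index(x)])); alternative
-- algorithm (no accumulating state), quadratic instead of linear.


-- ===== PORT A =====
-- A's loop body on state (temp, i, output). temp[x] read after the guaranteed
-- insert is ported as getD 0 (the key is always present at that point, so exact).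
def integerMappingStep (st : PySem.Dict String Int × Int × List Int) (x : String) :
    PySem.Dict String Int × Int × List Int :=
  let st1 :=
    if ¬ st.1.contains x then (st.1.insert x st.2.1, st.2.1 + 1, st.2.2)
    else st
  (st1.1, st1.2.1, st1.2.2 ++ [st1.1.getD x 0])

def integerMapping (label : List String) : List Int :=
  (label.foldl integerMappingStep (PySem.Dict.empty, 0, [])).2.2

-- ===== PORT B =====
-- [len(set(label[:label.index(x)])) for x in label]; label.index(x) cannot fail
-- since x is drawn from label, so the 'none' branch is unreachable (ported as 0).
def integerMapping_alt (label : List String) : List Int :=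
  label.map (fun x =>
    match PySem.List.index? label x with
    | some k => PySem.Set.len (PySem.Set.ofList (PySem.List.slice label none (some (k : Int))))
    | none => 0)

-- ===== PRECONDITION & SPEC =====
def Spec_integerMapping (label : List String) (out : List Int) : Prop := out = integerMapping_alt label
instance (label : List String) (out : List Int) : Decidable (Spec_integerMapping label out) := by unfold Spec_integerMapping; infer_instance

-- ===== CLAIM (what is proved, stated in full; the proofs are below) =====
def Claim_equal_integerMapping : Prop := ∀ (label : List String), Dom_integerMapping label → Spec_integerMapping label (integerMapping label)

-- ===== LEMMAS AND PROOFS =====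

-- the two shapes of one loop step of A
theorem stepA_mem (temp : PySem.Dict String Int) (i : Int) (out : List Int) (x : String)
    (h : temp.contains x = true) :
    integerMappingStep (temp, i, out) x = (temp, i, out ++ [temp.getD x 0]) := by
  simp [integerMappingStep, h]

theorem stepA_new (temp : PySem.Dict String Int) (i : Int) (out : List Int) (x : String)
    (h : temp.contains x = false) :
    integerMappingStep (temp, i, out) x =
      (temp.insert x i, i + 1, out ++ [(temp.insert x i).getD x 0]) := by
  simp [integerMappingStep, h]

-- B-side: the number of distinct labels before the first occurrence of x
-- is exactly x's position in the dedup (first-appearance) list.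
theorem prefix_distinct_count (pre suf : List String) (x : String) (hx : x ∉ pre) :
    ((PySem.Set.ofList pre).length : Int) =
      ((PySem.List.dedup (pre ++ x :: suf)).idxOf x : Int) := by
  have hxo : x ∉ PySem.Set.ofList pre := fun h => hx ((PySem.Set.mem_ofList pre x).mp h)
  have hded : PySem.List.dedup (pre ++ x :: suf) =
      PySem.Set.update (PySem.Set.ofList pre ++ [x]) suf := by
    rw [PySem.List.dedup_eq_ofList, PySem.Set.ofList_append, PySem.Set.update_cons,
      PySem.Set.add_of_not_mem hxo]
  have hpref : (PySem.Set.ofList pre ++ [x]) <+: PySem.List.dedup (pre ++ x :: suf) := by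
    rw [hded, PySem.Set.update_eq_append_filter]; exact List.prefix_append _ _
  have hmem : x ∈ PySem.Set.ofList pre ++ [x] := by simp
  rw [← hpref.idxOf_eq_of_mem hmem, List.idxOf_append_of_notMem hxo]
  simp

-- B's comprehension computes the first-appearance index within the dedup list.
theorem alt_eq_map_idxOf (label : List String) :
    integerMapping_alt label =
      label.map (fun x => ((PySem.List.dedup label).idxOf x : Int)) := by
  unfold integerMapping_alt
  apply List.map_congr_left
  intro x hx
  obtain ⟨k, hk⟩ := Option.isSome_iff_exists.mp
    ((PySem.List.index?_isSome_iff label x).mpr hx)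
  obtain ⟨pre, suf, hsplit, hlen, hxpre⟩ := (PySem.List.index?_eq_some_iff label x k).mp hk
  rw [hk]
  simp only
  rw [PySem.List.slice_to_natCast, hsplit, ← hlen, List.take_left]
  simpa [PySem.Set.len] using prefix_distinct_count pre suf x hxpre

-- A's loop invariant: with temp = the index dict of the distinct prefix u and i = |u|,
-- the remaining loop emits the first-appearance index (within the final distinct list)
-- of each remaining element.
theorem loopA_inv (rest : List String) : ∀ (u : List String)
    (temp : PySem.Dict String Int) (i : Int) (out : List Int),
    u.Nodup →
    temp.keys = u →
    (∀ x ∈ u, temp.getD x 0 = (u.idxOf x : Int)) →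
    i = (u.length : Int) →
    (rest.foldl integerMappingStep (temp, i, out)).2.2 =
      out ++ rest.map (fun x => ((PySem.Set.update u rest).idxOf x : Int)) := by
  induction rest with
  | nil => intro u temp i out _ _ _ _; simp [PySem.Set.update_nil]
  | cons x xs ih =>
    intro u temp i out hnd hkeys hget hi
    have hcont : temp.contains x = decide (x ∈ u) := by
      rw [PySem.Dict.contains_eq_decide_mem_keys, hkeys]
    by_cases hxu : x ∈ u
    · -- x already seen: dict unchanged, emit u.idxOf x
      have hpre : u <+: PySem.Set.update u xs := by
        rw [PySem.Set.update_eq_append_filter]; exact List.prefix_append _ _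
      have hidx : u.idxOf x = (PySem.Set.update u xs).idxOf x :=
        hpre.idxOf_eq_of_mem hxu
      rw [List.foldl_cons, stepA_mem temp i out x (by rw [hcont]; simp [hxu])]
      rw [ih u temp i (out ++ [temp.getD x 0]) hnd hkeys hget hi]
      rw [PySem.Set.update_cons, show PySem.Set.add u x = u from by
        simp [PySem.Set.add, PySem.Set.contains, hxu]]
      simp [hget x hxu, ← hidx]
    · -- x new: insert at index i = |u|, u grows to u ++ [x]
      have hadd : PySem.Set.add u x = u ++ [x] := by
        simp [PySem.Set.add, PySem.Set.contains, hxu]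
      have hnd' : (u ++ [x]).Nodup :=
        hnd.append (List.nodup_singleton x)
          (by intro a ha hax; rw [List.mem_singleton] at hax; exact hxu (hax ▸ ha))
      have hkeys' : (temp.insert x i).keys = u ++ [x] := by
        rw [PySem.Dict.keys_insert_of_not_contains, hkeys]
        rw [hcont]; simp [hxu]
      have hget' : ∀ y ∈ u ++ [x],
          (temp.insert x i).getD y 0 = ((u ++ [x]).idxOf y : Int) := by
        intro y hy
        rw [PySem.Dict.getD_insert]
        rcases List.mem_append.mp hy with hyu | hyx
        · have hyx : y ≠ x := fun h => hxu (h ▸ hyu)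
          rw [if_neg hyx, hget y hyu,
            List.IsPrefix.idxOf_eq_of_mem (List.prefix_append u [x]) hyu]
        · have hyx : y = x := by simpa using hyx
          subst hyx
          rw [if_pos rfl, hi, List.idxOf_append_of_notMem hxu]
          simp
      rw [List.foldl_cons, stepA_new temp i out x (by rw [hcont]; simp [hxu])]
      rw [ih (u ++ [x]) (temp.insert x i) (i + 1)
        (out ++ [(temp.insert x i).getD x 0]) hnd' hkeys' hget'
        (by rw [hi]; simp [List.length_append])]
      rw [PySem.Set.update_cons, hadd]
      have hx0 : (temp.insert x i).getD x 0 = ((u ++ [x]).idxOf x : Int) :=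
        hget' x (by simp)
      have hxfin : (u ++ [x]).idxOf x = (PySem.Set.update (u ++ [x]) xs).idxOf x := by
        apply List.IsPrefix.idxOf_eq_of_mem _ (by simp)
        rw [PySem.Set.update_eq_append_filter]; exact List.prefix_append _ _
      simp [hx0, ← hxfin]

-- ===== VERDICT (by name: the statement is the Claim_ definition above) =====
theorem integerMapping_spec : Claim_equal_integerMapping := by
  intro label _
  unfold Spec_integerMapping
  rw [alt_eq_map_idxOf]
  unfold integerMapping
  rw [loopA_inv label [] PySem.Dict.empty 0 [] List.nodup_nil
    (by simp [PySem.Dict.keys_empty]) (by simp) (by simp)]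
  rw [PySem.Set.update_nil_left, PySem.List.dedup_eq_ofList]
  simp
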